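-- pv_equiv track=rewrite | github.com/yassataiseer/competitive-programming | dmoj/Imena.py | break_sentence
-- ===== SOURCE A (Python) =====
-- def break_sentence(sentences):
--     counter = []
--     stuff = ""
--     for i in sentences:
--         if i =="?" or i =="." or i == "!":
--             counter.append(stuff)
--             stuff = ""
--         else:
--             stuff += i
--     return counter
-- ===== SOURCE B (Python) =====
-- def break_sentence(sentences):
--     ends = [i for i, c in enumerate(sentences) if c == "?" or c == "." or c == "!"]
--     out = []
--     prev = 0
--     for p in ends:
--         out.append(sentences[prev:p])
--         prev = p + 1
--     return out
-- ===== Notes on version B (the rewrite author's own statement) =====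
-- stated objective: alternative
-- what changed: Replaces A's single pass that accumulates characters into a growing segment string with a two-phase build: first collect the indices of all sentence-ending characters, then slice the input between successive delimiter indices, discarding trailing text after the last delimiter.
import Mathlib
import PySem

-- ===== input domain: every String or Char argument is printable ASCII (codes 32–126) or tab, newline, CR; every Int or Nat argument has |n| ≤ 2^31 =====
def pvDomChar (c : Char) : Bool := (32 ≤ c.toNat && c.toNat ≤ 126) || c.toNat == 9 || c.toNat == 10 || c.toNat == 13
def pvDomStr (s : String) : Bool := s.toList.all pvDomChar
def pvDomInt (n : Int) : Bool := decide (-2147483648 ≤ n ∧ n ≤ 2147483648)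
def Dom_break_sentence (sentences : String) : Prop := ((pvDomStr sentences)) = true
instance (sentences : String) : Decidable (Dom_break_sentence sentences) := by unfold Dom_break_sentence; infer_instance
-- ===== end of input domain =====

-- B replaces A's single accumulate-characters pass by a two-phase build (collect delimiter
-- indices, then slice between successive indices); alternative decomposition, same cost.


-- ===== PORT A =====
-- A's loop: state (counter, stuff); stuff is the string since the last delimiter (as chars).
def breakLoopA : List Char → List String → List Char → List String
  | [], counter, _ => counter
  | c :: cs, counter, stuff =>
    if c = '?' ∨ c = '.' ∨ c = '!' then breakLoopA cs (counter ++ [String.ofList stuff]) []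
    else breakLoopA cs counter (stuff ++ [c])

def break_sentence (sentences : String) : List String :=
  breakLoopA sentences.toList [] []

-- ===== PORT B =====
-- the comprehension: indices of delimiter characters
def altEnds (s : List Char) : List Int :=
  ((PySem.List.enumerate s 0).filter (fun p => p.2 == '?' || p.2 == '.' || p.2 == '!')).map Prod.fst

-- the for-loop over the collected indices: state (prev, out)
def altLoop (s : List Char) : List Int → Int → List String → List String
  | [], _, out => out
  | p :: ps, prev, out =>
      altLoop s ps (p + 1) (out ++ [String.ofList (PySem.List.slice s (some prev) (some p))])

def break_sentence_alt (sentences : String) : List String :=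
  altLoop sentences.toList (altEnds sentences.toList) 0 []

-- ===== PRECONDITION & SPEC =====
def Spec_break_sentence (sentences : String) (out : List String) : Prop := out = break_sentence_alt sentences
instance (sentences : String) (out : List String) : Decidable (Spec_break_sentence sentences out) := by unfold Spec_break_sentence; infer_instance

-- ===== CLAIM (what is proved, stated in full; the proofs are below) =====
def Claim_equal_break_sentence : Prop := ∀ (sentences : String), Dom_break_sentence sentences → Spec_break_sentence sentences (break_sentence sentences)

-- ===== LEMMAS AND PROOFS =====

-- Core invariant: if the yet-unprocessed suffix of s starting at `prev` is stuff ++ cs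
-- (stuff = chars since the last delimiter, located at s[prev : prev+|stuff|]),
-- then B's slice loop over the delimiter indices of cs equals A's loop on cs.
theorem altLoop_eq_breakLoopA (cs : List Char) :
    ∀ (stuff : List Char) (prev : Nat) (out : List String) (s : List Char),
      s.drop prev = stuff ++ cs →
      altLoop s
        (((PySem.List.enumerate cs ((prev : Int) + (stuff.length : Int))).filter
            (fun p => p.2 == '?' || p.2 == '.' || p.2 == '!')).map Prod.fst)
        (prev : Int) out
      = breakLoopA cs out stuff := by
  induction cs with
  | nil =>
      intro stuff prev out s _
      simp [PySem.List.enumerate_nil, altLoop, breakLoopA]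
  | cons c cs ih =>
      intro stuff prev out s hdrop
      rw [PySem.List.enumerate_cons]
      by_cases h : c = '?' ∨ c = '.' ∨ c = '!'
      · have hb : (c == '?' || c == '.' || c == '!') = true := by
          rcases h with h | h | h <;> simp [h]
        rw [List.filter_cons]
        simp only [hb, if_true, List.map_cons, altLoop, breakLoopA, if_pos h]
        have hslice : PySem.List.slice s (some (prev : Int))
            (some ((prev : Int) + (stuff.length : Int))) = stuff := by
          rw [PySem.List.slice_natCast_add, hdrop]
          simp
        rw [hslice]
        have hdrop' : s.drop (prev + stuff.length + 1) = [] ++ cs := by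
          have : s.drop (prev + stuff.length + 1)
              = (s.drop prev).drop (stuff.length + 1) := by
            rw [List.drop_drop]; ring_nf
          rw [this, hdrop, Nat.add_comm stuff.length 1, ← List.drop_drop]
          simp
        have := ih [] (prev + stuff.length + 1) (out ++ [String.ofList stuff]) s hdrop'
        simpa [add_assoc, add_comm, add_left_comm] using this
      · have hb : (c == '?' || c == '.' || c == '!') = false := by
          rcases (not_or.mp h) with ⟨h1, h2⟩
          rcases (not_or.mp h2) with ⟨h2, h3⟩
          simp [h1, h2, h3]
        rw [List.filter_cons]
        simp only [hb, breakLoopA, if_neg h]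
        have hdrop' : s.drop prev = (stuff ++ [c]) ++ cs := by
          rw [hdrop]; simp
        have := ih (stuff ++ [c]) prev out s hdrop'
        simpa [add_assoc, add_comm, add_left_comm] using this

-- ===== VERDICT (by name: the statement is the Claim_ definition above) =====
theorem break_sentence_spec : Claim_equal_break_sentence := by
  intro sentences _
  unfold Spec_break_sentence break_sentence break_sentence_alt altEnds
  have := altLoop_eq_breakLoopA sentences.toList [] 0 [] sentences.toList (by simp)
  simp at this ⊢; exact this.symm
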